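-- pv_equiv track=rewrite | github.com/Harry-Chen/permutation-generator | perm.py | from_natural
-- ===== SOURCE A (Python) =====
-- from typing import List, ClassVar
--
-- def from_natural(natural: int) -> List[int]:
--     assert natural > 0
--     i, fac = 1, 1
--     while fac <= natural:
--         i += 1
--         fac *= i
--     fac //= i
--     i -= 1
--     numbers = []
--     while i > 0:
--         numbers.append(natural // fac)
--         natural %= fac
--         fac //= i
--         i -= 1
--     return numbers
-- ===== SOURCE B (Python) =====
-- def from_natural(natural):
--     assert natural > 0
--     digits = []
--     i = 1
--     while natural > 0:
--         i += 1
--         digits.append(natural % i)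
--         natural //= i
--     return digits[::-1]
-- ===== Notes on version B (the rewrite author's own statement) =====
-- stated objective: simpler
-- what changed: Extracts factorial-base digits least-significant-first with a single mod/floordiv loop and reverses at the end, instead of first searching for the largest factorial and then peeling digits most-significant-first.
import Mathlib
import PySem

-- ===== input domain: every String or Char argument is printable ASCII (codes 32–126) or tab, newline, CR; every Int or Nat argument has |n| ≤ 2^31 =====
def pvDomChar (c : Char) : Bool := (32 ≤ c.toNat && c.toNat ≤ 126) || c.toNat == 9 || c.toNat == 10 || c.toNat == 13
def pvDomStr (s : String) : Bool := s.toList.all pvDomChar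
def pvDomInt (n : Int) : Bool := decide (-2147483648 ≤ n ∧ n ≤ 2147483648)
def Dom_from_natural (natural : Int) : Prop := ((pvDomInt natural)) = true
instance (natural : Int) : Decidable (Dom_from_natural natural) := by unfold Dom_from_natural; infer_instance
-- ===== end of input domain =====

-- B extracts the factorial-base digits least-significant-first with a single mod/floordiv loop
-- and reverses at the end, instead of A's search for the largest factorial followed by a
-- most-significant-first digit loop; same values on every positive input (Pre_).

-- ===== PORT A =====
-- first while loop of A: while fac <= natural: i += 1; fac *= i
-- (the hypothesis arguments only carry the loop invariants 1 ≤ i, 1 ≤ fac for termination)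
def pvFindFac (natural i fac : Int) (hi : 1 ≤ i) (hfac : 1 ≤ fac) : Int × Int :=
  if h : fac ≤ natural then
    pvFindFac natural (i + 1) (fac * (i + 1))
      (le_add_of_le_of_nonneg hi zero_le_one)
      (le_trans hfac (le_mul_of_one_le_right (le_trans zero_le_one hfac)
        (le_add_of_le_of_nonneg hi zero_le_one)))
  else (i, fac)
termination_by (natural + 1 - fac).toNat
decreasing_by
  exact (Int.toNat_lt_toNat (sub_pos.mpr (Int.lt_add_one_iff.mpr h))).mpr
    (sub_lt_sub_left
      (lt_mul_of_one_lt_right (lt_of_lt_of_le zero_lt_one hfac)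
        (lt_add_of_le_of_pos hi zero_lt_one)) (natural + 1))

-- second while loop of A: while i > 0: numbers.append(natural // fac); natural %= fac; fac //= i; i -= 1
def pvDigitsLoop (i fac natural : Int) (acc : List Int) : List Int :=
  if h : 0 < i then
    pvDigitsLoop (i - 1) (PySem.Int.floordiv fac i) (PySem.Int.mod natural fac)
      (acc ++ [PySem.Int.floordiv natural fac])
  else acc
termination_by i.toNat
decreasing_by exact (Int.toNat_lt_toNat h).mpr (sub_lt_self i zero_lt_one)

def from_natural (natural : Int) : List Int :=
  let p := pvFindFac natural 1 1 (le_refl 1) (le_refl 1)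
  pvDigitsLoop (p.1 - 1) (PySem.Int.floordiv p.2 p.1) natural []

-- ===== PORT B =====
-- B's loop: while natural > 0: i += 1; digits.append(natural % i); natural //= i
def pvAltLoop (i natural : Int) (digits : List Int) (hi : 1 ≤ i) : List Int :=
  if h : 0 < natural then
    pvAltLoop (i + 1) (PySem.Int.floordiv natural (i + 1)) (digits ++ [PySem.Int.mod natural (i + 1)])
      (le_add_of_le_of_nonneg hi zero_le_one)
  else digits
termination_by natural.toNat
decreasing_by
  rw [PySem.Int.floordiv_eq_ediv_of_pos
    (lt_of_lt_of_le zero_lt_one (le_add_of_le_of_nonneg hi zero_le_one))]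
  exact (Int.toNat_lt_toNat h).mpr
    (Int.ediv_lt_of_lt_mul
      (lt_of_lt_of_le zero_lt_one (le_add_of_le_of_nonneg hi zero_le_one))
      (lt_mul_of_one_lt_right h (lt_add_of_le_of_pos hi zero_lt_one)))

def from_natural_alt (natural : Int) : List Int :=
  (PySem.List.slice? (pvAltLoop 1 natural [] (le_refl 1)) none none (-1)).getD []

-- ===== PRECONDITION & SPEC =====
-- A asserts that the input is positive (AssertionError otherwise); Pre_ is exactly that assert.
def Pre_from_natural (natural : Int) : Prop := 0 < natural
instance (natural : Int) : Decidable (Pre_from_natural natural) := by unfold Pre_from_natural; infer_instance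
def pvWitness_from_natural : Int := (5)
def Spec_from_natural (natural : Int) (out : List Int) : Prop := out = from_natural_alt natural
instance (natural : Int) (out : List Int) : Decidable (Spec_from_natural natural out) := by unfold Spec_from_natural; infer_instance

-- ===== CLAIM (what is proved, stated in full; the proofs are below) =====
def Claim_equal_from_natural : Prop := ∀ (natural : Int), Dom_from_natural natural → Pre_from_natural natural → Spec_from_natural natural (from_natural natural)

-- ===== LEMMAS AND PROOFS =====

/-- digit of `n` at factorial-base position `j`. -/
def pvDigit (n j : ℕ) : ℕ := (n / Nat.factorial j) % (j + 1)

/-- Nat mirror of A's second loop with the invariant `fac = k!` built in. -/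
def pvDescDigits : ℕ → ℕ → List ℕ
  | 0, _ => []
  | k + 1, n => (n / Nat.factorial (k + 1)) :: pvDescDigits k (n % Nat.factorial (k + 1))

/-- Nat mirror of B's loop; at state `j` the divisor is `j+2`. -/
def pvAscNat (j n : ℕ) : List ℕ :=
  if h : n = 0 then [] else (n % (j + 2)) :: pvAscNat (j + 1) (n / (j + 2))
termination_by n
decreasing_by exact Nat.div_lt_self (Nat.pos_of_ne_zero h) (by omega)

/-- rising product (j+2)·(j+3)⋯(j+k+1). -/
def pvFfac (j : ℕ) : ℕ → ℕ
  | 0 => 1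
  | k + 1 => pvFfac j k * (j + k + 2)

lemma pvFfac_pos (j k : ℕ) : 0 < pvFfac j k := by
  induction k with
  | zero => simp [pvFfac]
  | succ k ih => simp only [pvFfac]; positivity

lemma pvFfac_succ_left (j k : ℕ) : pvFfac j (k + 1) = (j + 2) * pvFfac (j + 1) k := by
  induction k generalizing j with
  | zero => simp [pvFfac]
  | succ k ih =>
    calc pvFfac j (k + 1 + 1) = pvFfac j (k + 1) * (j + (k + 1) + 2) := rfl
      _ = (j + 2) * pvFfac (j + 1) k * (j + (k + 1) + 2) := by rw [ih]
      _ = (j + 2) * (pvFfac (j + 1) k * ((j + 1) + k + 2)) := by ring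
      _ = (j + 2) * pvFfac (j + 1) (k + 1) := rfl

lemma pvFfac_zero_eq (k : ℕ) : pvFfac 0 k = Nat.factorial (k + 1) := by
  induction k with
  | zero => simp [pvFfac]
  | succ k ih =>
    rw [show pvFfac 0 (k + 1) = pvFfac 0 k * (0 + k + 2) from rfl, ih,
      Nat.factorial_succ (k + 1)]
    ring

lemma pvDigit_mod (n m j : ℕ) (h : j < m) : pvDigit (n % Nat.factorial m) j = pvDigit n j := by
  obtain ⟨c, hc⟩ : Nat.factorial (j + 1) ∣ Nat.factorial m := Nat.factorial_dvd_factorial h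
  have hm : Nat.factorial m = c * (j + 1) * Nat.factorial j := by
    rw [hc, Nat.factorial_succ]; ring
  have hsplit : n = n % Nat.factorial m + n / Nat.factorial m * Nat.factorial m :=
    (Nat.mod_add_div' n (Nat.factorial m)).symm
  unfold pvDigit
  conv_rhs => rw [hsplit]
  set r := n % Nat.factorial m with hr
  set q := n / Nat.factorial m with hq
  have e1 : r + q * Nat.factorial m = r + (q * (c * (j + 1))) * Nat.factorial j := by
    rw [hm]; ring
  rw [e1, Nat.add_mul_div_right _ _ (Nat.factorial_pos j)]
  have e2 : r / Nat.factorial j + q * (c * (j + 1))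
      = r / Nat.factorial j + (q * c) * (j + 1) := by ring
  rw [e2, Nat.add_mul_mod_self_right]

lemma pvDescDigits_eq (k : ℕ) : ∀ n : ℕ, n < Nat.factorial (k + 1) →
    pvDescDigits k n = ((List.range k).map (fun t => pvDigit n (t + 1))).reverse := by
  induction k with
  | zero => intro n _; simp [pvDescDigits]
  | succ k ih =>
    intro n hn
    have hlt : n / Nat.factorial (k + 1) < k + 2 := by
      rw [Nat.div_lt_iff_lt_mul (Nat.factorial_pos _)]
      calc n < Nat.factorial (k + 2) := hn
        _ = (k + 2) * Nat.factorial (k + 1) := Nat.factorial_succ _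
    have htop : pvDigit n (k + 1) = n / Nat.factorial (k + 1) := by
      unfold pvDigit; exact Nat.mod_eq_of_lt hlt
    rw [List.range_succ, List.map_append, List.reverse_append]
    simp only [List.map_cons, List.map_nil, List.reverse_cons, List.reverse_nil, List.nil_append,
      List.singleton_append]
    rw [show pvDescDigits (k + 1) n
        = (n / Nat.factorial (k + 1)) :: pvDescDigits k (n % Nat.factorial (k + 1)) from rfl]
    rw [ih (n % Nat.factorial (k + 1)) (Nat.mod_lt _ (Nat.factorial_pos _))]
    rw [htop]
    congr 2
    exact List.map_congr_left
      (fun t ht => pvDigit_mod n (k + 1) (t + 1) (by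
        have := List.mem_range.mp ht; omega))

lemma pvAscNat_eq (k : ℕ) : ∀ j m : ℕ, pvFfac j k ≤ m → m < pvFfac j (k + 1) →
    pvAscNat j m = (List.range (k + 1)).map (fun t => (m / pvFfac j t) % (j + t + 2)) := by
  induction k with
  | zero =>
    intro j m h1 h2
    simp only [pvFfac] at h1 h2
    have hm : m ≠ 0 := by omega
    rw [pvAscNat, dif_neg hm]
    have h0 : m / (j + 2) = 0 := Nat.div_eq_of_lt (by omega)
    rw [h0, pvAscNat]
    simp [pvFfac]
  | succ k ih =>
    intro j m h1 h2
    have hm : m ≠ 0 := by have := pvFfac_pos j (k + 1); omega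
    rw [pvAscNat, dif_neg hm]
    have hlow : pvFfac (j + 1) k ≤ m / (j + 2) := by
      rw [Nat.le_div_iff_mul_le (by omega)]
      calc pvFfac (j + 1) k * (j + 2) = (j + 2) * pvFfac (j + 1) k := by ring
        _ = pvFfac j (k + 1) := (pvFfac_succ_left j k).symm
        _ ≤ m := h1
    have hhigh : m / (j + 2) < pvFfac (j + 1) (k + 1) := by
      rw [Nat.div_lt_iff_lt_mul (by omega)]
      calc m < pvFfac j (k + 2) := h2
        _ = (j + 2) * pvFfac (j + 1) (k + 1) := pvFfac_succ_left j (k + 1)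
        _ = pvFfac (j + 1) (k + 1) * (j + 2) := by ring
    rw [ih (j + 1) (m / (j + 2)) hlow hhigh]
    conv_rhs => rw [List.range_succ_eq_map]
    rw [List.map_cons, List.map_map]
    congr 1
    · simp [pvFfac]
    · apply List.map_congr_left
      intro t _
      simp only [Function.comp]
      have hdiv : m / pvFfac j (t + 1) = m / (j + 2) / pvFfac (j + 1) t := by
        rw [pvFfac_succ_left, Nat.div_div_eq_div_mul, Nat.mul_comm]
      rw [hdiv]
      congr 1
      omega

-- bridge: A's first loop returns (j, j!) with (j-1)! ≤ natural < j! and j ≥ 2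
lemma pvFindFac_spec (natural : Int) : ∀ (N : ℕ) (i fac : Int) (hi : 1 ≤ i) (hfac : 1 ≤ fac),
    (natural + 1 - fac).toNat ≤ N →
    fac.toNat = Nat.factorial i.toNat →
    (2 ≤ i → Nat.factorial (i.toNat - 1) ≤ natural.toNat) →
    (fac ≤ natural ∨ 2 ≤ i) →
    ∃ j : ℕ, 2 ≤ j ∧ pvFindFac natural i fac hi hfac = ((j : Int), ((Nat.factorial j : ℕ) : Int)) ∧
      natural < ((Nat.factorial j : ℕ) : Int) ∧ Nat.factorial (j - 1) ≤ natural.toNat := by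
  intro N
  induction N with
  | zero =>
    intro i fac hi hfac hN hfaceq hinv hdisj
    have hgt : ¬ fac ≤ natural := by omega
    rw [pvFindFac, dif_neg hgt]
    refine ⟨i.toNat, by omega, ?_, ?_, hinv (by omega)⟩
    · have h1 : ((i.toNat : ℕ) : Int) = i := Int.toNat_of_nonneg (by omega)
      have h2 : ((fac.toNat : ℕ) : Int) = fac := Int.toNat_of_nonneg (by omega)
      rw [h1, ← hfaceq, h2]
    · have h2 : ((fac.toNat : ℕ) : Int) = fac := Int.toNat_of_nonneg (by omega)
      rw [← hfaceq, h2]; omega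
  | succ N ihN =>
    intro i fac hi hfac hN hfaceq hinv hdisj
    by_cases hle : fac ≤ natural
    · rw [pvFindFac, dif_pos hle]
      apply ihN
      · have h2 : fac + 1 ≤ fac * (i + 1) := by nlinarith
        omega
      · have hc : fac * (i + 1) = (((fac.toNat * (i + 1).toNat : ℕ)) : Int) := by
          push_cast
          rw [Int.toNat_of_nonneg (by omega), Int.toNat_of_nonneg (by omega)]
        rw [hc, Int.toNat_natCast, hfaceq]
        have h3 : (i + 1).toNat = i.toNat + 1 := by omega
        rw [h3, Nat.mul_comm, ← Nat.factorial_succ]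
      · intro _
        have h1 : (i + 1).toNat - 1 = i.toNat := by omega
        rw [h1, ← hfaceq]
        omega
      · right; omega
    · rw [pvFindFac, dif_neg hle]
      refine ⟨i.toNat, by omega, ?_, ?_, hinv (by omega)⟩
      · have h1 : ((i.toNat : ℕ) : Int) = i := Int.toNat_of_nonneg (by omega)
        have h2 : ((fac.toNat : ℕ) : Int) = fac := Int.toNat_of_nonneg (by omega)
        rw [h1, ← hfaceq, h2]
      · have h2 : ((fac.toNat : ℕ) : Int) = fac := Int.toNat_of_nonneg (by omega)
        rw [← hfaceq, h2]; omega

-- bridge: A's second loop with i = k, fac = k! computes pvDescDigits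
lemma pvDigitsLoop_eq (k : ℕ) : ∀ (n : Int) (acc : List Int), 0 ≤ n →
    pvDigitsLoop ((k : ℕ) : Int) ((Nat.factorial k : ℕ) : Int) n acc
      = acc ++ (pvDescDigits k n.toNat).map (fun x => ((x : ℕ) : Int)) := by
  induction k with
  | zero =>
    intro n acc _
    rw [pvDigitsLoop, dif_neg (by omega)]
    simp [pvDescDigits]
  | succ k ih =>
    intro n acc hn
    rw [pvDigitsLoop, dif_pos (by positivity)]
    have hn' : n = ((n.toNat : ℕ) : Int) := (Int.toNat_of_nonneg hn).symm
    have e1 : (((k + 1 : ℕ)) : Int) - 1 = ((k : ℕ) : Int) := by push_cast; ring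
    have e2 : PySem.Int.floordiv ((Nat.factorial (k + 1) : ℕ) : Int) (((k + 1 : ℕ)) : Int)
        = ((Nat.factorial k : ℕ) : Int) := by
      rw [PySem.Int.floordiv_natCast]
      congr 1
      rw [Nat.factorial_succ, Nat.mul_div_cancel_left _ (by omega)]
    have e3 : PySem.Int.mod n ((Nat.factorial (k + 1) : ℕ) : Int)
        = (((n.toNat % Nat.factorial (k + 1)) : ℕ) : Int) := by
      conv_lhs => rw [hn']
      rw [PySem.Int.mod_natCast]
    have e4 : PySem.Int.floordiv n ((Nat.factorial (k + 1) : ℕ) : Int)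
        = (((n.toNat / Nat.factorial (k + 1)) : ℕ) : Int) := by
      conv_lhs => rw [hn']
      rw [PySem.Int.floordiv_natCast]
    rw [e1, e2, e3, e4, ih _ _ (by positivity), Int.toNat_natCast]
    rw [show pvDescDigits (k + 1) n.toNat
        = (n.toNat / Nat.factorial (k + 1)) :: pvDescDigits k (n.toNat % Nat.factorial (k + 1))
        from rfl]
    simp only [List.map_cons, List.append_assoc, List.singleton_append]

-- bridge: B's loop computes pvAscNat
lemma pvAltLoop_eq (m : ℕ) : ∀ (j : ℕ) (i : Int) (digits : List Int) (h : 1 ≤ i),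
    i = ((j : ℕ) : Int) + 1 →
    pvAltLoop i ((m : ℕ) : Int) digits h
      = digits ++ (pvAscNat j m).map (fun x => ((x : ℕ) : Int)) := by
  induction m using Nat.strong_induction_on with
  | _ m ihm =>
    intro j i digits h hij
    subst hij
    by_cases hm : m = 0
    · subst hm
      rw [pvAltLoop, dif_neg (by omega)]
      rw [pvAscNat]
      simp
    · rw [pvAltLoop, dif_pos (by positivity)]
      have e0 : (((j : ℕ) : Int) + 1 + 1) = (((j + 2 : ℕ)) : Int) := by push_cast; ring
      have e1 : PySem.Int.floordiv ((m : ℕ) : Int) (((j : ℕ) : Int) + 1 + 1)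
          = (((m / (j + 2)) : ℕ) : Int) := by
        rw [e0, PySem.Int.floordiv_natCast]
      have e2 : PySem.Int.mod ((m : ℕ) : Int) (((j : ℕ) : Int) + 1 + 1)
          = (((m % (j + 2)) : ℕ) : Int) := by
        rw [e0, PySem.Int.mod_natCast]
      have hdec : m / (j + 2) < m := Nat.div_lt_self (by omega) (by omega)
      rw [e1, e2]
      conv_rhs => rw [pvAscNat, dif_neg hm]
      rw [ihm (m / (j + 2)) hdec (j + 1) _ _ _ (by push_cast; ring)]
      simp

-- ===== VERDICT (by name: the statement is the Claim_ definition above) =====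
theorem from_natural_spec : Claim_equal_from_natural := by
  intro natural _hdom hpre
  unfold Spec_from_natural
  have hpos : 0 < natural := hpre
  set m : ℕ := natural.toNat with hm
  have hnat : natural = ((m : ℕ) : Int) := (Int.toNat_of_nonneg (by omega)).symm
  obtain ⟨j, hj2, hres, hjgt, hjle⟩ := pvFindFac_spec natural (natural + 1 - 1).toNat 1 1
    (le_refl 1) (le_refl 1) (le_refl _) (by simp) (by omega) (Or.inl (by omega))
  set k : ℕ := j - 1 with hk
  have hjk : j = k + 1 := by omega
  have hmlt : m < Nat.factorial (k + 1) := by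
    rw [← hjk]
    rw [hnat] at hjgt
    exact_mod_cast hjgt
  have hmge : Nat.factorial k ≤ m := hjle
  have hA : from_natural natural
      = ((List.range k).map (fun t => ((pvDigit m (t + 1) : ℕ) : Int))).reverse := by
    have e1 : ((j : ℕ) : Int) - 1 = ((k : ℕ) : Int) := by rw [hjk]; push_cast; ring
    have e2 : PySem.Int.floordiv ((Nat.factorial j : ℕ) : Int) ((j : ℕ) : Int)
        = ((Nat.factorial k : ℕ) : Int) := by
      rw [PySem.Int.floordiv_natCast]
      congr 1
      rw [hjk, Nat.factorial_succ, Nat.mul_div_cancel_left _ (by omega)]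
    have step : from_natural natural
        = pvDigitsLoop (((j : ℕ) : Int) - 1)
            (PySem.Int.floordiv ((Nat.factorial j : ℕ) : Int) ((j : ℕ) : Int)) natural [] := by
      simp only [from_natural, hres]
    rw [step, e1, e2, pvDigitsLoop_eq k natural [] (by omega)]
    rw [← hm, pvDescDigits_eq k m hmlt]
    simp
  have hB : from_natural_alt natural
      = ((List.range k).map (fun t => ((pvDigit m (t + 1) : ℕ) : Int))).reverse := by
    unfold from_natural_alt
    rw [PySem.List.slice?_none_none_neg_one]
    simp only [Option.getD_some]
    conv_lhs => rw [hnat]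
    rw [pvAltLoop_eq m 0 1 [] (le_refl 1) (by norm_num)]
    have hasc : pvAscNat 0 m = (List.range k).map (fun t => pvDigit m (t + 1)) := by
      obtain ⟨k', hk'⟩ : ∃ k', k = k' + 1 := ⟨k - 1, by omega⟩
      rw [hk']
      rw [pvAscNat_eq k' 0 m (by rw [pvFfac_zero_eq]; rw [hk'] at hmge; exact hmge)
        (by rw [pvFfac_zero_eq]; rw [hk'] at hmlt; exact hmlt)]
      apply List.map_congr_left
      intro t _
      rw [pvFfac_zero_eq]
      unfold pvDigit
      congr 1
      omega
    rw [hasc]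
    simp
  rw [hA, hB]
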